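-- pv_equiv track=rewrite | github.com/poglodjan/Python_experience | bioinformatics/algorithms_sequence_alignment/needleman_wunsch.py | fill_matrix_sw
-- ===== SOURCE A (Python) =====
-- def fill_matrix_sw(seq1, seq2, scoring_matrix, substitution_matrix, gap_penalty):
--     """ _summary_
--     uses the algorithm:
--         (1) H(i,j) = max(0,
--             H(i-1,j-1) + S(A(i), B(i))
--             H(i-1,j) + GP
--             H(i,j-1) + GP
--                 )
--
--     and saves the max_score with its position
--         returns: <array [][]> scoring matrix, <int> max_score, <tuple (i,j)> max_pos
--     """
--     max_score = 0
--     max_pos = (0, 0)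
--     for i in range(1, len(seq1) + 1):
--         for j in range(1, len(seq2) + 1):
--              # as in Needleman Wunsch:
--             match = scoring_matrix[i-1][j-1] + substitution_matrix[seq1[i-1], seq2[j-1]]
--             delete = scoring_matrix[i-1][j] + gap_penalty
--             insert = scoring_matrix[i][j-1] + gap_penalty
--              # but reset to zero if all scores are negative (local alignment)
--             scoring_matrix[i][j] = max(0, match, delete, insert)
--
--             # Track the maximum score and its position for traceback
--             if scoring_matrix[i][j] > max_score:
--                 max_score = scoring_matrix[i][j]
--                 max_pos = (i, j)
--     return scoring_matrix, max_score, max_pos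
-- ===== SOURCE B (Python) =====
-- def fill_matrix_sw(seq1, seq2, scoring_matrix, substitution_matrix, gap_penalty):
--     """Anti-diagonal (wavefront) Smith-Waterman fill: cells are computed in
--     order of increasing i+j, which is valid because every cell depends only on
--     the two preceding anti-diagonals; the best score and its position are then
--     located by a separate row-major scan of the filled matrix."""
--     n, m = len(seq1), len(seq2)
--     for s in range(2, n + m + 1):
--         for i in range(max(1, s - m), min(n, s - 1) + 1):
--             j = s - i
--             match = scoring_matrix[i-1][j-1] + substitution_matrix[seq1[i-1], seq2[j-1]]
--             delete = scoring_matrix[i-1][j] + gap_penalty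
--             insert = scoring_matrix[i][j-1] + gap_penalty
--             scoring_matrix[i][j] = max(0, match, delete, insert)
--     best, pos = 0, (0, 0)
--     for i in range(1, n + 1):
--         for j in range(1, m + 1):
--             if scoring_matrix[i][j] > best:
--                 best, pos = scoring_matrix[i][j], (i, j)
--     return scoring_matrix, best, pos
-- ===== Notes on version B (the rewrite author's own statement) =====
-- stated objective: alternative
-- what changed: B fills the DP table in anti-diagonal (wavefront) order -- iterating over diagonals s=i+j and the cells on each diagonal, valid because every cell depends only on the two preceding diagonals -- instead of A's row-major fill, and locates the maximum score/position in a separate row-major scan instead of tracking it inside the fill loop.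
import Mathlib
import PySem

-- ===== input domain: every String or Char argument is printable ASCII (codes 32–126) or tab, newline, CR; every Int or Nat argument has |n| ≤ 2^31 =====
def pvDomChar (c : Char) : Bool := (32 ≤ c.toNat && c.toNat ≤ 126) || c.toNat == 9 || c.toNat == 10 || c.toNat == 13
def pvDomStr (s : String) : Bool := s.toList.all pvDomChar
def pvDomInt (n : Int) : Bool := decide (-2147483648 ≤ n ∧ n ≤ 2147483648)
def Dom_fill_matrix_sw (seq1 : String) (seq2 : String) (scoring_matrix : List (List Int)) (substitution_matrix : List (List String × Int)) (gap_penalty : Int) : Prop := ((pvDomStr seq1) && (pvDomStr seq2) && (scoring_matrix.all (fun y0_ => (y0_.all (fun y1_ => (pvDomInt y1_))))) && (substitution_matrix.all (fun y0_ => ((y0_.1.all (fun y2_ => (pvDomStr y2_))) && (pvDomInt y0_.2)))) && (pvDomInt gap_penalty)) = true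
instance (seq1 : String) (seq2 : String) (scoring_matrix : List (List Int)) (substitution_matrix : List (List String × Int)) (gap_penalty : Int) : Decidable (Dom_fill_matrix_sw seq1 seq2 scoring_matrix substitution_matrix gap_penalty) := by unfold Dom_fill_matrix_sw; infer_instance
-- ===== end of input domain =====

-- B fills the Smith-Waterman table in anti-diagonal (wavefront) order instead of A's
-- row-major order, and locates the best score/position in a separate row-major scan
-- (same cost, different algorithmic decomposition).  Both mutate scoring_matrix the
-- same way in Python; the equivalence proved here is about the RETURN value.


-- ===== PORT A =====
-- substitution_matrix[c1, c2]: first-match association-list lookup, keyed by the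
-- pair of 1-char strings; the default 0 is never reached under Pre_ (KeyError excluded).
def pvSub (sub : List (List String × Int)) (c1 c2 : Char) : Int :=
  ((sub.find? (fun p => p.1 == [String.ofList [c1], String.ofList [c2]])).map (·.2)).getD 0

-- one iteration of A's inner j-loop; state = (scoring_matrix, max_score, max_pos).
-- pyGetD/pySetD are exact here: under Pre_ every index used is in range.
def pvStepA (sub : List (List String × Int)) (gp : Int) (l1 l2 : List Char) (i : Int)
    (st : List (List Int) × Int × (Int × Int)) (j : Int) :
    List (List Int) × Int × (Int × Int) :=
  let sm := st.1
  let mtch := PySem.List.pyGetD (PySem.List.pyGetD sm (i-1) []) (j-1) 0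
              + pvSub sub (PySem.List.pyGetD l1 (i-1) ' ') (PySem.List.pyGetD l2 (j-1) ' ')
  let del := PySem.List.pyGetD (PySem.List.pyGetD sm (i-1) []) j 0 + gp
  let ins := PySem.List.pyGetD (PySem.List.pyGetD sm i []) (j-1) 0 + gp
  let sm' := PySem.List.pySetD sm i
               (PySem.List.pySetD (PySem.List.pyGetD sm i []) j (max (max (max 0 mtch) del) ins))
  if PySem.List.pyGetD (PySem.List.pyGetD sm' i []) j 0 > st.2.1 then
    (sm', PySem.List.pyGetD (PySem.List.pyGetD sm' i []) j 0, (i, j))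
  else
    (sm', st.2.1, st.2.2)

-- A's inner j-loop for one value of i
def pvRowA (sub : List (List String × Int)) (gp : Int) (l1 l2 : List Char)
    (st : List (List Int) × Int × (Int × Int)) (i : Int) :
    List (List Int) × Int × (Int × Int) :=
  (PySem.List.pyRange 1 ((l2.length : Int) + 1) 1).foldl (pvStepA sub gp l1 l2 i) st

def fill_matrix_sw (seq1 : String) (seq2 : String) (scoring_matrix : List (List Int)) (substitution_matrix : List (List String × Int)) (gap_penalty : Int) : List (List Int) × Int × (Int × Int) :=
  let l1 := seq1.toList
  let l2 := seq2.toList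
  (PySem.List.pyRange 1 ((l1.length : Int) + 1) 1).foldl
    (pvRowA substitution_matrix gap_penalty l1 l2) (scoring_matrix, 0, (0, 0))

-- ===== PORT B =====
-- body of B's wavefront loop: j = s - i, then scoring_matrix[i][j] = max(0, ...)
def pvStepB (sub : List (List String × Int)) (gp : Int) (l1 l2 : List Char) (s : Int)
    (M : List (List Int)) (i : Int) : List (List Int) :=
  let j := s - i
  let mtch := PySem.List.pyGetD (PySem.List.pyGetD M (i-1) []) (j-1) 0
              + pvSub sub (PySem.List.pyGetD l1 (i-1) ' ') (PySem.List.pyGetD l2 (j-1) ' ')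
  let del := PySem.List.pyGetD (PySem.List.pyGetD M (i-1) []) j 0 + gp
  let ins := PySem.List.pyGetD (PySem.List.pyGetD M i []) (j-1) 0 + gp
  PySem.List.pySetD M i
    (PySem.List.pySetD (PySem.List.pyGetD M i []) j (max (max (max 0 mtch) del) ins))

-- one anti-diagonal s: for i in range(max(1, s-m), min(n, s-1)+1)
def pvDiagB (sub : List (List String × Int)) (gp : Int) (l1 l2 : List Char)
    (M : List (List Int)) (s : Int) : List (List Int) :=
  (PySem.List.pyRange (max 1 (s - (l2.length : Int))) (min (l1.length : Int) (s - 1) + 1) 1).foldl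
    (pvStepB sub gp l1 l2 s) M

-- B's fill pass: for s in range(2, n + m + 1)
def pvFillB (sub : List (List String × Int)) (gp : Int) (l1 l2 : List Char)
    (sm : List (List Int)) : List (List Int) :=
  (PySem.List.pyRange 2 ((l1.length : Int) + (l2.length : Int) + 1) 1).foldl
    (pvDiagB sub gp l1 l2) sm

-- B's second pass, inner loop of row i: if scoring_matrix[i][j] > best: best, pos = ..., (i, j)
def pvScanRow (out : List (List Int)) (i : Int) (bp : Int × (Int × Int)) (m : Nat) :
    Int × (Int × Int) :=
  (PySem.List.pyRange 1 ((m : Int) + 1) 1).foldl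
    (fun bp j => if PySem.List.pyGetD (PySem.List.pyGetD out i []) j 0 > bp.1
                 then (PySem.List.pyGetD (PySem.List.pyGetD out i []) j 0, (i, j)) else bp) bp

-- B's second pass: row-major argmax with strict improvement
def pvScanB (n m : Nat) (out : List (List Int)) : Int × (Int × Int) :=
  (PySem.List.pyRange 1 ((n : Int) + 1) 1).foldl
    (fun bp i => pvScanRow out i bp m) (0, (0, 0))

def fill_matrix_sw_alt (seq1 : String) (seq2 : String) (scoring_matrix : List (List Int)) (substitution_matrix : List (List String × Int)) (gap_penalty : Int) : List (List Int) × Int × (Int × Int) :=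
  let l1 := seq1.toList
  let l2 := seq2.toList
  let out := pvFillB substitution_matrix gap_penalty l1 l2 scoring_matrix
  let bp := pvScanB l1.length l2.length out
  (out, bp.1, bp.2)

-- ===== PRECONDITION & SPEC =====
-- Pre_ is exactly where the Python A returns normally: when both sequences are
-- nonempty, every touched row (indices 0..len(seq1)) must be long enough
-- (else IndexError) and every needed substitution key present (else KeyError).
def Pre_fill_matrix_sw (seq1 : String) (seq2 : String) (scoring_matrix : List (List Int)) (substitution_matrix : List (List String × Int)) (gap_penalty : Int) : Prop :=
  seq1.toList = [] ∨ seq2.toList = [] ∨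
  (seq1.toList.length + 1 ≤ scoring_matrix.length ∧
   (∀ r ∈ scoring_matrix.take (seq1.toList.length + 1), seq2.toList.length + 1 ≤ r.length) ∧
   (∀ k1 < seq1.toList.length, ∀ k2 < seq2.toList.length,
      (substitution_matrix.find? (fun p =>
        p.1 == [String.ofList [seq1.toList.getD k1 ' '], String.ofList [seq2.toList.getD k2 ' ']])).isSome))
instance (seq1 : String) (seq2 : String) (scoring_matrix : List (List Int)) (substitution_matrix : List (List String × Int)) (gap_penalty : Int) : Decidable (Pre_fill_matrix_sw seq1 seq2 scoring_matrix substitution_matrix gap_penalty) := by unfold Pre_fill_matrix_sw; infer_instance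

def pvWitness_fill_matrix_sw : String × String × List (List Int) × (List (List String × Int)) × Int :=
  ("AB", "BA", [[0, 0, 0], [0, 0, 0], [0, 0, 0]], [(["A", "A"], 2), (["A", "B"], -1), (["B", "A"], -1), (["B", "B"], 2)], -2)

def Spec_fill_matrix_sw (seq1 : String) (seq2 : String) (scoring_matrix : List (List Int)) (substitution_matrix : List (List String × Int)) (gap_penalty : Int) (out : List (List Int) × Int × (Int × Int)) : Prop := out = fill_matrix_sw_alt seq1 seq2 scoring_matrix substitution_matrix gap_penalty
instance (seq1 : String) (seq2 : String) (scoring_matrix : List (List Int)) (substitution_matrix : List (List String × Int)) (gap_penalty : Int) (out : List (List Int) × Int × (Int × Int)) : Decidable (Spec_fill_matrix_sw seq1 seq2 scoring_matrix substitution_matrix gap_penalty out) := by unfold Spec_fill_matrix_sw; infer_instance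

-- ===== CLAIM (what is proved, stated in full; the proofs are below) =====
def Claim_equal_fill_matrix_sw : Prop := ∀ (seq1 : String) (seq2 : String) (scoring_matrix : List (List Int)) (substitution_matrix : List (List String × Int)) (gap_penalty : Int), Dom_fill_matrix_sw seq1 seq2 scoring_matrix substitution_matrix gap_penalty → Pre_fill_matrix_sw seq1 seq2 scoring_matrix substitution_matrix gap_penalty → Spec_fill_matrix_sw seq1 seq2 scoring_matrix substitution_matrix gap_penalty (fill_matrix_sw seq1 seq2 scoring_matrix substitution_matrix gap_penalty)

-- ===== LEMMAS AND PROOFS =====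

set_option maxRecDepth 4096 in
theorem fill_matrix_sw_witness_ok :
    Dom_fill_matrix_sw pvWitness_fill_matrix_sw.1 pvWitness_fill_matrix_sw.2.1
      pvWitness_fill_matrix_sw.2.2.1 pvWitness_fill_matrix_sw.2.2.2.1
      pvWitness_fill_matrix_sw.2.2.2.2 ∧
    Pre_fill_matrix_sw pvWitness_fill_matrix_sw.1 pvWitness_fill_matrix_sw.2.1
      pvWitness_fill_matrix_sw.2.2.1 pvWitness_fill_matrix_sw.2.2.2.1
      pvWitness_fill_matrix_sw.2.2.2.2 := by
  constructor <;> decide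

-- the value that cell (i, j) of the filled table holds (boundary cells keep
-- their initial value; both fill orders compute this same function)
def pvHf (sub : List (List String × Int)) (gp : Int) (l1 l2 : List Char)
    (sm : List (List Int)) : Nat → Nat → Int
  | 0, j => (sm.getD 0 []).getD j 0
  | i+1, 0 => (sm.getD (i+1) []).getD 0 0
  | i+1, j+1 =>
      max (max (max 0 (pvHf sub gp l1 l2 sm i j + pvSub sub (l1.getD i ' ') (l2.getD j ' ')))
            (pvHf sub gp l1 l2 sm i (j+1) + gp))
          (pvHf sub gp l1 l2 sm (i+1) j + gp)
termination_by i j => (i, j)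

-- partial-matrix characterization: cells satisfying p hold their final value,
-- all other cells still hold their initial value
def pvCell (sub : List (List String × Int)) (gp : Int) (l1 l2 : List Char)
    (sm : List (List Int)) (p : Nat → Nat → Prop) [∀ i j, Decidable (p i j)]
    (i j : Nat) : Int :=
  if p i j then pvHf sub gp l1 l2 sm i j else (sm.getD i []).getD j 0

def pvInv (sub : List (List String × Int)) (gp : Int) (l1 l2 : List Char)
    (sm : List (List Int)) (p : Nat → Nat → Prop) [∀ i j, Decidable (p i j)]
    (M : List (List Int)) : Prop :=
  M.length = sm.length ∧ (∀ i, (M.getD i []).length = (sm.getD i []).length) ∧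
  ∀ i j, (M.getD i []).getD j 0 = pvCell sub gp l1 l2 sm p i j

-- processed-cell predicates: A after k full rows and t cells of row k+1
abbrev pvPA (m k t i j : Nat) : Prop :=
  1 ≤ i ∧ 1 ≤ j ∧ j ≤ m ∧ (i ≤ k ∨ (i = k + 1 ∧ j ≤ t))

-- B after all diagonals < s and c cells of diagonal s
abbrev pvPB (n m s c i j : Nat) : Prop :=
  1 ≤ i ∧ i ≤ n ∧ 1 ≤ j ∧ j ≤ m ∧ (i + j < s ∨ (i + j = s ∧ i < max 1 (s - m) + c))

-- B after d full diagonals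
abbrev pvPD (n m d i j : Nat) : Prop := 1 ≤ i ∧ i ≤ n ∧ 1 ≤ j ∧ j ≤ m ∧ i + j < d + 2

-- the pure row-major argmax scan, expressed on pvHf
def pvSrow (sub : List (List String × Int)) (gp : Int) (l1 l2 : List Char)
    (sm : List (List Int)) (i : Nat) (bp : Int × (Int × Int)) : Nat → Int × (Int × Int)
  | 0 => bp
  | t+1 =>
      let b := pvSrow sub gp l1 l2 sm i bp t
      if pvHf sub gp l1 l2 sm i (t+1) > b.1
      then (pvHf sub gp l1 l2 sm i (t+1), ((i : Int), ((t+1 : Nat) : Int))) else b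

def pvStot (sub : List (List String × Int)) (gp : Int) (l1 l2 : List Char)
    (sm : List (List Int)) : Nat → Int × (Int × Int)
  | 0 => (0, (0, 0))
  | k+1 => pvSrow sub gp l1 l2 sm (k+1) (pvStot sub gp l1 l2 sm k) l2.length


lemma pvCell_congr (sub : List (List String × Int)) (gp : Int) (l1 l2 : List Char)
    (sm : List (List Int)) (p q : Nat → Nat → Prop)
    [∀ i j, Decidable (p i j)] [∀ i j, Decidable (q i j)]
    (i j : Nat) (h : p i j ↔ q i j) :
    pvCell sub gp l1 l2 sm p i j = pvCell sub gp l1 l2 sm q i j := by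
  simp only [pvCell]
  exact if_congr h rfl rfl

lemma pvInv_congr (sub : List (List String × Int)) (gp : Int) (l1 l2 : List Char)
    (sm M : List (List Int)) (p q : Nat → Nat → Prop)
    [∀ i j, Decidable (p i j)] [∀ i j, Decidable (q i j)]
    (h : ∀ i j, p i j ↔ q i j) (hInv : pvInv sub gp l1 l2 sm p M) :
    pvInv sub gp l1 l2 sm q M :=
  ⟨hInv.1, hInv.2.1, fun i j => (hInv.2.2 i j).trans (pvCell_congr _ _ _ _ _ _ _ i j (h i j))⟩

lemma pvInv_init (sub : List (List String × Int)) (gp : Int) (l1 l2 : List Char)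
    (sm : List (List Int)) (p : Nat → Nat → Prop) [∀ i j, Decidable (p i j)]
    (hfalse : ∀ i j, ¬ p i j) : pvInv sub gp l1 l2 sm p sm :=
  ⟨rfl, fun _ => rfl, fun i j => by simp [pvCell, hfalse i j]⟩

lemma pv_matrix_ext (M M' : List (List Int)) (h0 : M.length = M'.length)
    (h1 : ∀ i, (M.getD i []).length = (M'.getD i []).length)
    (h2 : ∀ i j, (M.getD i []).getD j 0 = (M'.getD i []).getD j 0) : M = M' := by
  have hg : ∀ (L : List (List Int)) (i : Nat) (h : i < L.length), L.getD i [] = L[i]'h := by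
    intro L i h; rw [List.getD_eq_getElem?_getD, List.getElem?_eq_getElem h]; rfl
  have hg2 : ∀ (L : List Int) (j : Nat) (h : j < L.length), L.getD j 0 = L[j]'h := by
    intro L j h; rw [List.getD_eq_getElem?_getD, List.getElem?_eq_getElem h]; rfl
  apply List.ext_getElem h0
  intro i hi hi'
  have hr : M.getD i [] = M[i] := hg M i hi
  have hr' : M'.getD i [] = M'[i] := hg M' i hi'
  apply List.ext_getElem (by rw [← hr, ← hr', h1 i])
  intro j hj hj'
  have e := h2 i j
  rw [hr, hr'] at e
  rwa [hg2 _ _ hj, hg2 _ _ hj'] at e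

lemma pvInv_unique (sub : List (List String × Int)) (gp : Int) (l1 l2 : List Char)
    (sm M M' : List (List Int)) (p : Nat → Nat → Prop) [∀ i j, Decidable (p i j)]
    (hA : pvInv sub gp l1 l2 sm p M) (hB : pvInv sub gp l1 l2 sm p M') : M = M' :=
  pv_matrix_ext M M' (hA.1.trans hB.1.symm)
    (fun i => (hA.2.1 i).trans (hB.2.1 i).symm)
    (fun i j => (hA.2.2 i j).trans (hB.2.2 i j).symm)

-- a processed (or boundary) cell of a partial matrix holds its pvHf value
lemma pv_read (sub : List (List String × Int)) (gp : Int) (l1 l2 : List Char)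
    (sm M : List (List Int)) (p : Nat → Nat → Prop) [∀ i j, Decidable (p i j)]
    (hInv : pvInv sub gp l1 l2 sm p M) (i j : Nat) (hij : p i j ∨ i = 0 ∨ j = 0) :
    (M.getD i []).getD j 0 = pvHf sub gp l1 l2 sm i j := by
  rw [hInv.2.2 i j]
  simp only [pvCell]
  split_ifs with h
  · rfl
  · rcases hij with hp | hi | hj
    · exact absurd hp h
    · subst hi; simp [pvHf]
    · subst hj; cases i <;> simp [pvHf]

-- the max(0, match, delete, insert) the ports compute IS pvHf of the new cell
lemma pv_val (sub : List (List String × Int)) (gp : Int) (l1 l2 : List Char)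
    (sm M : List (List Int)) (p : Nat → Nat → Prop) [∀ i j, Decidable (p i j)]
    (hInv : pvInv sub gp l1 l2 sm p M) (a' b' : Nat)
    (hd : p a' b' ∨ a' = 0 ∨ b' = 0)
    (hu : p a' (b' + 1) ∨ a' = 0)
    (hl : p (a' + 1) b' ∨ b' = 0) :
    max (max (max 0 ((M.getD a' []).getD b' 0 + pvSub sub (l1.getD a' ' ') (l2.getD b' ' ')))
          ((M.getD a' []).getD (b' + 1) 0 + gp))
        ((M.getD (a' + 1) []).getD b' 0 + gp)
     = pvHf sub gp l1 l2 sm (a' + 1) (b' + 1) := by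
  rw [pv_read sub gp l1 l2 sm M p hInv a' b' (by tauto),
      pv_read sub gp l1 l2 sm M p hInv a' (b' + 1) (by tauto),
      pv_read sub gp l1 l2 sm M p hInv (a' + 1) b' (by tauto)]
  simp only [pvHf]

-- writing pvHf a b into cell (a, b) advances the invariant from p to p'
lemma pv_write (sub : List (List String × Int)) (gp : Int) (l1 l2 : List Char)
    (sm M : List (List Int)) (p p' : Nat → Nat → Prop)
    [∀ i j, Decidable (p i j)] [∀ i j, Decidable (p' i j)] (a b : Nat)
    (hn : l1.length + 1 ≤ sm.length)
    (hrow : ∀ idx, idx ≤ l1.length → l2.length + 1 ≤ ((sm.getD idx [] : List Int)).length)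
    (ha1 : 1 ≤ a) (ha2 : a ≤ l1.length) (hb1 : 1 ≤ b) (hb2 : b ≤ l2.length)
    (hiff : ∀ i j, p' i j ↔ p i j ∨ (i = a ∧ j = b))
    (hInv : pvInv sub gp l1 l2 sm p M) :
    pvInv sub gp l1 l2 sm p'
      (M.set a ((M.getD a []).set b (pvHf sub gp l1 l2 sm a b))) := by
  obtain ⟨hL, hRL, hC⟩ := hInv
  have haM : a < M.length := by rw [hL]; omega
  have hbR : b < (M.getD a []).length := by
    rw [hRL a]; have := hrow a (by omega); omega
  have hgetA : (M.set a ((M.getD a []).set b (pvHf sub gp l1 l2 sm a b))).getD a []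
      = (M.getD a []).set b (pvHf sub gp l1 l2 sm a b) := by
    rw [List.getD_eq_getElem?_getD, List.getElem?_set_self haM, Option.getD_some]
  have hgetO : ∀ i, i ≠ a →
      (M.set a ((M.getD a []).set b (pvHf sub gp l1 l2 sm a b))).getD i []
      = M.getD i [] := by
    intro i hia
    rw [List.getD_eq_getElem?_getD, List.getElem?_set_ne (by omega), ← List.getD_eq_getElem?_getD]
  refine ⟨by simp [hL], ?_, ?_⟩
  · intro i
    by_cases hia : i = a
    · rw [hia, hgetA, List.length_set, hRL]
    · rw [hgetO i hia, hRL]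
  · intro i j
    by_cases hia : i = a
    · by_cases hjb : j = b
      · rw [hia, hjb, hgetA, List.getD_eq_getElem?_getD, List.getElem?_set_self hbR,
            Option.getD_some]
        simp only [pvCell]
        rw [if_pos ((hiff a b).2 (Or.inr ⟨rfl, rfl⟩))]
      · rw [hia, hgetA, List.getD_eq_getElem?_getD,
            List.getElem?_set_ne (show b ≠ j from fun h => hjb (h.symm)),
            ← List.getD_eq_getElem?_getD, hC a j]
        apply pvCell_congr
        rw [hiff]
        constructor
        · exact Or.inl
        · rintro (h | ⟨-, h⟩)
          · exact h
          · exact absurd h hjb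
    · rw [hgetO i hia, hC i j]
      apply pvCell_congr
      rw [hiff]
      constructor
      · exact Or.inl
      · rintro (h | ⟨h, -⟩)
        · exact h
        · exact absurd h hia

-- rows 0..len(seq1) are long enough (restatement of Pre_'s take-form condition)
lemma pv_rowlen (l1 l2 : List Char) (sm : List (List Int))
    (hn : l1.length + 1 ≤ sm.length)
    (hrow : ∀ r ∈ sm.take (l1.length + 1), l2.length + 1 ≤ r.length) :
    ∀ idx, idx ≤ l1.length → l2.length + 1 ≤ ((sm.getD idx [] : List Int)).length := by
  intro idx hle
  have hlt : idx < sm.length := by omega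
  have hm : sm[idx] ∈ sm.take (l1.length + 1) := by
    have hg : (sm.take (l1.length + 1))[idx]'(by simp [List.length_take]; omega) = sm[idx] :=
      List.getElem_take
    rw [← hg]
    exact List.getElem_mem _
  have := hrow _ hm
  rwa [List.getD_eq_getElem?_getD, List.getElem?_eq_getElem hlt, Option.getD_some]

-- === A's fill-and-track loop ===

lemma pvA_step (sub : List (List String × Int)) (gp : Int) (l1 l2 : List Char)
    (sm M : List (List Int)) (k t : Nat) (s : Int) (q : Int × Int)
    (hn : l1.length + 1 ≤ sm.length)
    (hrow : ∀ idx, idx ≤ l1.length → l2.length + 1 ≤ ((sm.getD idx [] : List Int)).length)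
    (hk : k + 1 ≤ l1.length) (ht : t + 1 ≤ l2.length)
    (hInv : pvInv sub gp l1 l2 sm (pvPA l2.length k t) M) :
    pvStepA sub gp l1 l2 (((k + 1 : Nat)) : Int) (M, s, q) (((t + 1 : Nat)) : Int)
      = (M.set (k + 1) ((M.getD (k + 1) []).set (t + 1) (pvHf sub gp l1 l2 sm (k + 1) (t + 1))),
         if pvHf sub gp l1 l2 sm (k + 1) (t + 1) > s
         then (pvHf sub gp l1 l2 sm (k + 1) (t + 1), (((k + 1 : Nat) : Int), ((t + 1 : Nat) : Int)))
         else (s, q))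
      ∧ pvInv sub gp l1 l2 sm (pvPA l2.length k (t + 1))
          (M.set (k + 1) ((M.getD (k + 1) []).set (t + 1) (pvHf sub gp l1 l2 sm (k + 1) (t + 1)))) := by
  have e1 : ((k + 1 : Nat) : Int) - 1 = ((k : Nat) : Int) := by push_cast; ring
  have e2 : ((t + 1 : Nat) : Int) - 1 = ((t : Nat) : Int) := by push_cast; ring
  have hv := pv_val sub gp l1 l2 sm M (pvPA l2.length k t) hInv k t
    (by unfold pvPA; omega) (by unfold pvPA; omega) (by unfold pvPA; omega)
  have hwrite := pv_write sub gp l1 l2 sm M (pvPA l2.length k t) (pvPA l2.length k (t + 1))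
    (k + 1) (t + 1) hn hrow (by omega) hk (by omega) ht
    (by intro i j; unfold pvPA; omega) hInv
  have hk1M : k + 1 < M.length := by rw [hInv.1]; omega
  have ht1R : t + 1 < (M.getD (k + 1) []).length := by
    rw [hInv.2.1]
    have := hrow (k + 1) (by omega); omega
  have hrow1 : (M.set (k + 1) ((M.getD (k + 1) []).set (t + 1)
      (pvHf sub gp l1 l2 sm (k + 1) (t + 1)))).getD (k + 1) []
      = (M.getD (k + 1) []).set (t + 1) (pvHf sub gp l1 l2 sm (k + 1) (t + 1)) := by
    rw [List.getD_eq_getElem?_getD, List.getElem?_set_self hk1M]; rfl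
  have hrow2 : ((M.getD (k + 1) []).set (t + 1)
      (pvHf sub gp l1 l2 sm (k + 1) (t + 1))).getD (t + 1) 0
      = pvHf sub gp l1 l2 sm (k + 1) (t + 1) := by
    rw [List.getD_eq_getElem?_getD, List.getElem?_set_self ht1R]; rfl
  refine ⟨?_, hwrite⟩
  simp only [pvStepA, e1, e2, PySem.List.pyGetD_natCast, PySem.List.pySetD_natCast]
  rw [hv, hrow1, hrow2]
  split_ifs <;> rfl

lemma pvA_inner (sub : List (List String × Int)) (gp : Int) (l1 l2 : List Char)
    (sm : List (List Int))
    (hn : l1.length + 1 ≤ sm.length)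
    (hrow : ∀ idx, idx ≤ l1.length → l2.length + 1 ≤ ((sm.getD idx [] : List Int)).length)
    (k : Nat) (hk : k + 1 ≤ l1.length) :
    ∀ t, t ≤ l2.length → ∀ (M : List (List Int)) (bp : Int × (Int × Int)),
    pvInv sub gp l1 l2 sm (pvPA l2.length k 0) M →
    ∃ M', (PySem.List.pyRange 1 ((t : Int) + 1) 1).foldl
            (pvStepA sub gp l1 l2 ((k + 1 : Nat) : Int)) (M, bp)
          = (M', pvSrow sub gp l1 l2 sm (k + 1) bp t)
        ∧ pvInv sub gp l1 l2 sm (pvPA l2.length k t) M' := by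
  intro t
  induction t with
  | zero =>
    intro _ M bp hInv
    exact ⟨M, by simp [PySem.List.pyRange_one_eq_nil, pvSrow], hInv⟩
  | succ t ih =>
    intro ht M bp hInv
    obtain ⟨M', heq, hInv'⟩ := ih (by omega) M bp hInv
    have hc : ((t + 1 : Nat) : Int) + 1 = ((t : Int) + 1) + 1 := by push_cast; ring
    have hstep := pvA_step sub gp l1 l2 sm M' k t
      (pvSrow sub gp l1 l2 sm (k + 1) bp t).1 (pvSrow sub gp l1 l2 sm (k + 1) bp t).2
      hn hrow hk (by omega) hInv'
    refine ⟨M'.set (k + 1) ((M'.getD (k + 1) []).set (t + 1)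
      (pvHf sub gp l1 l2 sm (k + 1) (t + 1))), ?_, hstep.2⟩
    rw [hc, PySem.List.pyRange_one_succ_right (by omega), List.foldl_append, heq]
    simp only [List.foldl_cons, List.foldl_nil]
    have e3 : ((t : Int) + 1) = ((t + 1 : Nat) : Int) := by push_cast; ring
    rw [e3]
    have : (M', pvSrow sub gp l1 l2 sm (k + 1) bp t)
        = (M', (pvSrow sub gp l1 l2 sm (k + 1) bp t).1,
               (pvSrow sub gp l1 l2 sm (k + 1) bp t).2) := rfl
    rw [this, hstep.1]
    simp only [pvSrow]

lemma pvA_outer (sub : List (List String × Int)) (gp : Int) (l1 l2 : List Char)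
    (sm : List (List Int))
    (hn : l1.length + 1 ≤ sm.length)
    (hrow : ∀ idx, idx ≤ l1.length → l2.length + 1 ≤ ((sm.getD idx [] : List Int)).length) :
    ∀ k, k ≤ l1.length →
    ∃ M, (PySem.List.pyRange 1 ((k : Int) + 1) 1).foldl
            (pvRowA sub gp l1 l2) (sm, 0, (0, 0))
          = (M, pvStot sub gp l1 l2 sm k)
        ∧ pvInv sub gp l1 l2 sm (pvPA l2.length k 0) M := by
  intro k
  induction k with
  | zero =>
    intro _
    refine ⟨sm, by simp [PySem.List.pyRange_one_eq_nil, pvStot], ?_⟩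
    exact pvInv_init sub gp l1 l2 sm _ (by intro i j; unfold pvPA; omega)
  | succ k ih =>
    intro hk
    obtain ⟨M, heq, hInv⟩ := ih (by omega)
    obtain ⟨M', heq', hInv'⟩ := pvA_inner sub gp l1 l2 sm hn hrow k (by omega)
      l2.length (le_refl _) M (pvStot sub gp l1 l2 sm k) hInv
    have hc : ((k + 1 : Nat) : Int) + 1 = ((k : Int) + 1) + 1 := by push_cast; ring
    refine ⟨M', ?_, ?_⟩
    · rw [hc, PySem.List.pyRange_one_succ_right (by omega), List.foldl_append, heq]
      simp only [List.foldl_cons, List.foldl_nil]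
      have e3 : ((k : Int) + 1) = ((k + 1 : Nat) : Int) := by push_cast; ring
      rw [e3, pvRowA, heq']
      rfl
    · exact pvInv_congr sub gp l1 l2 sm M' _ _ (by intro i j; unfold pvPA; omega) hInv'

-- === B's wavefront fill ===

lemma pvB_step (sub : List (List String × Int)) (gp : Int) (l1 l2 : List Char)
    (sm M : List (List Int)) (s a c : Nat)
    (hn : l1.length + 1 ≤ sm.length)
    (hrow : ∀ idx, idx ≤ l1.length → l2.length + 1 ≤ ((sm.getD idx [] : List Int)).length)
    (ha1 : 1 ≤ a) (ha2 : a ≤ l1.length) (hb1 : a + 1 ≤ s) (hb2 : s ≤ a + l2.length)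
    (ha_eq : a = max 1 (s - l2.length) + c)
    (hInv : pvInv sub gp l1 l2 sm (pvPB l1.length l2.length s c) M) :
    pvStepB sub gp l1 l2 (s : Int) M ((a : Nat) : Int)
      = M.set a ((M.getD a []).set (s - a) (pvHf sub gp l1 l2 sm a (s - a)))
    ∧ pvInv sub gp l1 l2 sm (pvPB l1.length l2.length s (c + 1))
        (M.set a ((M.getD a []).set (s - a) (pvHf sub gp l1 l2 sm a (s - a)))) := by
  obtain ⟨a', rfl⟩ : ∃ a', a = a' + 1 := ⟨a - 1, by omega⟩
  obtain ⟨b', hb⟩ : ∃ b', s - (a' + 1) = b' + 1 := ⟨s - (a' + 1) - 1, by omega⟩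
  have e0 : (s : Int) - ((a' + 1 : Nat) : Int) = ((b' + 1 : Nat) : Int) := by omega
  have e1 : ((a' + 1 : Nat) : Int) - 1 = ((a' : Nat) : Int) := by push_cast; ring
  have e2 : ((b' + 1 : Nat) : Int) - 1 = ((b' : Nat) : Int) := by push_cast; ring
  have hv := pv_val sub gp l1 l2 sm M (pvPB l1.length l2.length s c) hInv a' b'
    (by unfold pvPB; omega) (by unfold pvPB; omega) (by unfold pvPB; omega)
  have hwrite := pv_write sub gp l1 l2 sm M (pvPB l1.length l2.length s c)
    (pvPB l1.length l2.length s (c + 1)) (a' + 1) (b' + 1) hn hrow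
    (by omega) ha2 (by omega) (by omega)
    (by intro i j; unfold pvPB; omega) hInv
  rw [hb]
  refine ⟨?_, hwrite⟩
  simp only [pvStepB, e0, e1, e2, PySem.List.pyGetD_natCast, PySem.List.pySetD_natCast]
  simp only [List.getD_eq_getElem?_getD] at hv ⊢
  rw [hv]

lemma pvB_inner (sub : List (List String × Int)) (gp : Int) (l1 l2 : List Char)
    (sm : List (List Int))
    (hn : l1.length + 1 ≤ sm.length)
    (hrow : ∀ idx, idx ≤ l1.length → l2.length + 1 ≤ ((sm.getD idx [] : List Int)).length)
    (s : Nat) (hs2 : 2 ≤ s) (hsnm : s ≤ l1.length + l2.length) :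
    ∀ c, max 1 (s - l2.length) + c ≤ min l1.length (s - 1) + 1 →
    ∀ M, pvInv sub gp l1 l2 sm (pvPB l1.length l2.length s 0) M →
    ∃ M', (PySem.List.pyRange ((max 1 (s - l2.length) : Nat) : Int)
             ((max 1 (s - l2.length) + c : Nat) : Int) 1).foldl
            (pvStepB sub gp l1 l2 (s : Int)) M = M'
        ∧ pvInv sub gp l1 l2 sm (pvPB l1.length l2.length s c) M' := by
  intro c
  induction c with
  | zero =>
    intro _ M hInv
    exact ⟨M, by simp [PySem.List.pyRange_one_eq_nil], hInv⟩
  | succ c ih =>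
    intro hc M hInv
    obtain ⟨M', heq, hInv'⟩ := ih (by omega) M hInv
    have hc2 : ((max 1 (s - l2.length) + (c + 1) : Nat) : Int)
        = ((max 1 (s - l2.length) + c : Nat) : Int) + 1 := by push_cast; ring
    have hstep := pvB_step sub gp l1 l2 sm M' s (max 1 (s - l2.length) + c) c
      hn hrow (by omega) (by omega) (by omega) (by omega) rfl hInv'
    refine ⟨_, ?_, hstep.2⟩
    rw [hc2, PySem.List.pyRange_one_succ_right (by push_cast; omega), List.foldl_append, heq]
    simp only [List.foldl_cons, List.foldl_nil]
    rw [hstep.1]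

lemma pvB_diag (sub : List (List String × Int)) (gp : Int) (l1 l2 : List Char)
    (sm M : List (List Int))
    (hn : l1.length + 1 ≤ sm.length)
    (hrow : ∀ idx, idx ≤ l1.length → l2.length + 1 ≤ ((sm.getD idx [] : List Int)).length)
    (hn1 : 1 ≤ l1.length) (hm1 : 1 ≤ l2.length)
    (s : Nat) (hs2 : 2 ≤ s) (hsnm : s ≤ l1.length + l2.length)
    (hInv : pvInv sub gp l1 l2 sm (pvPD l1.length l2.length (s - 2)) M) :
    pvInv sub gp l1 l2 sm (pvPD l1.length l2.length (s - 1))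
      (pvDiagB sub gp l1 l2 M (s : Int)) := by
  have hInv0 : pvInv sub gp l1 l2 sm (pvPB l1.length l2.length s 0) M :=
    pvInv_congr sub gp l1 l2 sm M _ _ (by intro i j; unfold pvPB pvPD; omega) hInv
  have hlohi : max 1 (s - l2.length) ≤ min l1.length (s - 1) + 1 := by omega
  obtain ⟨M', heq, hInv'⟩ := pvB_inner sub gp l1 l2 sm hn hrow s hs2 hsnm
    (min l1.length (s - 1) + 1 - max 1 (s - l2.length)) (by omega) M hInv0
  have e1 : max 1 ((s : Int) - (l2.length : Int)) = ((max 1 (s - l2.length) : Nat) : Int) := by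
    omega
  have e2 : min ((l1.length : Int)) ((s : Int) - 1) + 1
      = ((max 1 (s - l2.length) + (min l1.length (s - 1) + 1 - max 1 (s - l2.length)) : Nat) : Int) := by
    omega
  rw [pvDiagB, e1, e2, heq]
  exact pvInv_congr sub gp l1 l2 sm M' _ _ (by intro i j; unfold pvPB pvPD; omega) hInv'

lemma pvB_outer (sub : List (List String × Int)) (gp : Int) (l1 l2 : List Char)
    (sm : List (List Int))
    (hn : l1.length + 1 ≤ sm.length)
    (hrow : ∀ idx, idx ≤ l1.length → l2.length + 1 ≤ ((sm.getD idx [] : List Int)).length)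
    (hn1 : 1 ≤ l1.length) (hm1 : 1 ≤ l2.length) :
    ∀ d, d + 1 ≤ l1.length + l2.length →
    pvInv sub gp l1 l2 sm (pvPD l1.length l2.length d)
      ((PySem.List.pyRange 2 ((d : Int) + 2) 1).foldl (pvDiagB sub gp l1 l2) sm) := by
  intro d
  induction d with
  | zero =>
    intro _
    rw [show ((0 : Nat) : Int) + 2 = 2 by ring, PySem.List.pyRange_one_eq_nil (by omega)]
    exact pvInv_init sub gp l1 l2 sm _ (by intro i j; unfold pvPD; omega)
  | succ d ih =>
    intro hd
    have hInv := ih (by omega)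
    have hc : ((d + 1 : Nat) : Int) + 2 = ((d : Int) + 2) + 1 := by push_cast; ring
    rw [hc, PySem.List.pyRange_one_succ_right (by omega), List.foldl_append]
    simp only [List.foldl_cons, List.foldl_nil]
    have e3 : (d : Int) + 2 = ((d + 2 : Nat) : Int) := by push_cast; ring
    rw [e3]
    have := pvB_diag sub gp l1 l2 sm _ hn hrow hn1 hm1 (d + 2) (by omega) (by omega)
      (by simpa using hInv)
    simpa using this

-- === the row-major argmax scan of a fully filled matrix ===

lemma pvScan_row (sub : List (List String × Int)) (gp : Int) (l1 l2 : List Char)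
    (sm M : List (List Int))
    (hInv : pvInv sub gp l1 l2 sm (pvPA l2.length l1.length 0) M)
    (k : Nat) (hk : k + 1 ≤ l1.length) :
    ∀ t, t ≤ l2.length → ∀ bp,
    (PySem.List.pyRange 1 ((t : Int) + 1) 1).foldl
      (fun bp j => if PySem.List.pyGetD (PySem.List.pyGetD M ((k + 1 : Nat) : Int) []) j 0 > bp.1
                   then (PySem.List.pyGetD (PySem.List.pyGetD M ((k + 1 : Nat) : Int) []) j 0,
                         (((k + 1 : Nat) : Int), j)) else bp) bp
      = pvSrow sub gp l1 l2 sm (k + 1) bp t := by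
  intro t
  induction t with
  | zero => intro _ bp; simp [PySem.List.pyRange_one_eq_nil, pvSrow]
  | succ t ih =>
    intro ht bp
    have hc : ((t + 1 : Nat) : Int) + 1 = ((t : Int) + 1) + 1 := by push_cast; ring
    rw [hc, PySem.List.pyRange_one_succ_right (by omega), List.foldl_append, ih (by omega)]
    simp only [List.foldl_cons, List.foldl_nil]
    have e3 : ((t : Int) + 1) = ((t + 1 : Nat) : Int) := by push_cast; ring
    have hread : PySem.List.pyGetD (PySem.List.pyGetD M ((k + 1 : Nat) : Int) [])
        ((t + 1 : Nat) : Int) 0 = pvHf sub gp l1 l2 sm (k + 1) (t + 1) := by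
      rw [PySem.List.pyGetD_natCast, PySem.List.pyGetD_natCast]
      exact pv_read sub gp l1 l2 sm M _ hInv (k + 1) (t + 1)
        (Or.inl (by unfold pvPA; omega))
    rw [e3, hread]
    simp only [pvSrow]

lemma pvScan_total (sub : List (List String × Int)) (gp : Int) (l1 l2 : List Char)
    (sm M : List (List Int))
    (hInv : pvInv sub gp l1 l2 sm (pvPA l2.length l1.length 0) M) :
    ∀ k, k ≤ l1.length →
    (PySem.List.pyRange 1 ((k : Int) + 1) 1).foldl
      (fun bp i => pvScanRow M i bp l2.length) (0, (0, 0))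
      = pvStot sub gp l1 l2 sm k := by
  intro k
  induction k with
  | zero => intro _; simp [PySem.List.pyRange_one_eq_nil, pvStot]
  | succ k ih =>
    intro hk
    have hc : ((k + 1 : Nat) : Int) + 1 = ((k : Int) + 1) + 1 := by push_cast; ring
    rw [hc, PySem.List.pyRange_one_succ_right (by omega), List.foldl_append, ih (by omega)]
    simp only [List.foldl_cons, List.foldl_nil]
    have e3 : ((k : Int) + 1) = ((k + 1 : Nat) : Int) := by push_cast; ring
    rw [e3, pvScanRow,
        pvScan_row sub gp l1 l2 sm M hInv k (by omega) l2.length (le_refl _)]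
    rfl

-- === assembling the equivalence ===

lemma pv_main (seq1 seq2 : String) (sm : List (List Int))
    (sub : List (List String × Int)) (gp : Int)
    (hpre : Pre_fill_matrix_sw seq1 seq2 sm sub gp) :
    fill_matrix_sw seq1 seq2 sm sub gp = fill_matrix_sw_alt seq1 seq2 sm sub gp := by
  by_cases hm : seq2.toList = []
  · -- empty seq2: A's inner loop never runs; B's diagonals are all empty
    have hid : ∀ (st : List (List Int) × Int × (Int × Int)) (i : Int),
        pvRowA sub gp seq1.toList seq2.toList st i = st := by
      intro st i
      simp [pvRowA, hm, PySem.List.pyRange_one_eq_nil]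
    have hA : fill_matrix_sw seq1 seq2 sm sub gp = (sm, 0, (0, 0)) := by
      simp only [fill_matrix_sw]
      rw [PySem.List.foldl_congr_mem _ _ (fun st _ => st) _
        (by intro acc x _; rw [hid]), PySem.List.foldl_ignore]
    have hFill : pvFillB sub gp seq1.toList seq2.toList sm = sm := by
      simp only [pvFillB]
      rw [PySem.List.foldl_congr_mem _ _ (fun M _ => M) _ ?_, PySem.List.foldl_ignore]
      intro M x hx
      have hxr := (PySem.List.mem_pyRange_one).1 hx
      simp only [pvDiagB, hm]
      rw [PySem.List.pyRange_one_eq_nil (by simp)]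
      rfl
    have hScan : pvScanB seq1.toList.length seq2.toList.length sm = (0, (0, 0)) := by
      simp only [pvScanB, hm]
      rw [PySem.List.foldl_congr_mem _ _ (fun bp _ => bp) _
        (by intro acc x _
            simp [pvScanRow, PySem.List.pyRange_one_eq_nil]), PySem.List.foldl_ignore]
    rw [hA]
    simp only [fill_matrix_sw_alt, hFill, hScan]
  · by_cases hn0 : seq1.toList = []
    · -- empty seq1: A's outer loop never runs; B's diagonals are all empty
      have hA : fill_matrix_sw seq1 seq2 sm sub gp = (sm, 0, (0, 0)) := by
        simp [fill_matrix_sw, hn0, PySem.List.pyRange_one_eq_nil]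
      have hFill : pvFillB sub gp seq1.toList seq2.toList sm = sm := by
        simp only [pvFillB, hn0]
        rw [PySem.List.foldl_congr_mem _ _ (fun M _ => M) _ ?_, PySem.List.foldl_ignore]
        intro M x hx
        have hxr := (PySem.List.mem_pyRange_one).1 hx
        simp only [pvDiagB]
        rw [PySem.List.pyRange_one_eq_nil (by simp)]
        rfl
      have hScan : pvScanB seq1.toList.length seq2.toList.length sm = (0, (0, 0)) := by
        simp [pvScanB, hn0, PySem.List.pyRange_one_eq_nil]
      rw [hA]
      simp only [fill_matrix_sw_alt, hFill, hScan]
    · -- both nonempty: Pre_ supplies the size bounds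
      rcases hpre with h1 | h2 | ⟨hn, hrowtake, -⟩
      · exact absurd h1 hn0
      · exact absurd h2 hm
      have hrow := pv_rowlen seq1.toList seq2.toList sm hn hrowtake
      have hn1 : 1 ≤ seq1.toList.length := List.length_pos_iff.mpr hn0
      have hm1 : 1 ≤ seq2.toList.length := List.length_pos_iff.mpr hm
      obtain ⟨MA, heqA, hInvA⟩ := pvA_outer sub gp seq1.toList seq2.toList sm hn hrow
        seq1.toList.length (le_refl _)
      have hInvB0 := pvB_outer sub gp seq1.toList seq2.toList sm hn hrow hn1 hm1
        (seq1.toList.length + seq2.toList.length - 1) (by omega)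
      have eB : ((seq1.toList.length + seq2.toList.length - 1 : Nat) : Int) + 2
          = (seq1.toList.length : Int) + (seq2.toList.length : Int) + 1 := by omega
      rw [eB] at hInvB0
      have hInvB : pvInv sub gp seq1.toList seq2.toList sm
          (pvPA seq2.toList.length seq1.toList.length 0)
          (pvFillB sub gp seq1.toList seq2.toList sm) := by
        exact pvInv_congr sub gp seq1.toList seq2.toList sm _
          (pvPD seq1.toList.length seq2.toList.length
            (seq1.toList.length + seq2.toList.length - 1))
          (pvPA seq2.toList.length seq1.toList.length 0)
          (by intro i j; unfold pvPA pvPD; omega) hInvB0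
      have hMeq : MA = pvFillB sub gp seq1.toList seq2.toList sm :=
        pvInv_unique sub gp seq1.toList seq2.toList sm _ _ _ hInvA hInvB
      have hScan : pvScanB seq1.toList.length seq2.toList.length
          (pvFillB sub gp seq1.toList seq2.toList sm)
          = pvStot sub gp seq1.toList seq2.toList sm seq1.toList.length := by
        simp only [pvScanB]
        exact pvScan_total sub gp seq1.toList seq2.toList sm _ hInvB
          seq1.toList.length (le_refl _)
      show (PySem.List.pyRange 1 ((seq1.toList.length : Int) + 1) 1).foldl
            (pvRowA sub gp seq1.toList seq2.toList) (sm, 0, (0, 0))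
          = fill_matrix_sw_alt seq1 seq2 sm sub gp
      rw [heqA, hMeq]
      simp only [fill_matrix_sw_alt, hScan]


-- ===== VERDICT (by name: the statement is the Claim_ definition above) =====
theorem fill_matrix_sw_spec : Claim_equal_fill_matrix_sw := by
  intro seq1 seq2 sm sub gp _ hpre
  exact pv_main seq1 seq2 sm sub gp hpre
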